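-- pv_equiv track=rewrite | github.com/yangDM9378/Algorithm_Solving | 프로그래머스/2/86971. 전력망을 둘로 나누기/전력망을 둘로 나누기.py | solution
-- ===== SOURCE A (Python) =====
-- def solution(n, wires):
--     answer = n+1
--     for i in range(len(wires)):
--         cnt = 0
--         used = [0] * len(wires)
--         used[i] = 1
--         conn = []
--         conn.append(wires[i][0])
--         while conn:
--             st = conn.pop()
--             for j in range(len(wires)):
--                 if used[j] == 1: continue
--                 if wires[j][0] == st:
--                     conn.append(wires[j][1])
--                     used[j] = 1
--                     cnt += 1
--                 elif wires[j][1] == st: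
--                     conn.append(wires[j][0])
--                     used[j] = 1
--                     cnt += 1
--         answer = min(answer, abs(n - 2 - cnt - cnt))
--     return answer
-- ===== SOURCE B (Python) =====
-- def solution(n, wires):
--     m = len(wires)
--     # adjacency index: vertex value -> list of (edge index, other endpoint), in edge order
--     adj = {}
--     for j, w in enumerate(wires):
--         a, b = w[0], w[1]
--         adj.setdefault(a, []).append((j, b))
--         if b != a:
--             adj.setdefault(b, []).append((j, a))
--     answer = n + 1
--     for i in range(m):
--         used = [0] * m
--         used[i] = 1
--         cnt = 0
--         seen = set()
--         stack = [wires[i][0]]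
--         while stack:
--             st = stack.pop()
--             if st in seen:
--                 continue
--             seen.add(st)
--             for j, other in adj.get(st, ()):
--                 if not used[j]:
--                     used[j] = 1
--                     cnt += 1
--                     stack.append(other)
--         answer = min(answer, abs(n - 2 - 2 * cnt))
--     return answer
-- ===== Notes on version B (the rewrite author's own statement) =====
-- stated objective: faster
-- what changed: B builds an adjacency index (vertex value -> list of (edge index, other endpoint)) once and keeps a visited-vertex set per start edge, so each vertex is expanded once over its incident edges instead of rescanning the whole wire list at every pop as A does.
-- outside the precondition, e.g. on solution(3, [[5]]): A returns 1, B raises IndexError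
import Mathlib
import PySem

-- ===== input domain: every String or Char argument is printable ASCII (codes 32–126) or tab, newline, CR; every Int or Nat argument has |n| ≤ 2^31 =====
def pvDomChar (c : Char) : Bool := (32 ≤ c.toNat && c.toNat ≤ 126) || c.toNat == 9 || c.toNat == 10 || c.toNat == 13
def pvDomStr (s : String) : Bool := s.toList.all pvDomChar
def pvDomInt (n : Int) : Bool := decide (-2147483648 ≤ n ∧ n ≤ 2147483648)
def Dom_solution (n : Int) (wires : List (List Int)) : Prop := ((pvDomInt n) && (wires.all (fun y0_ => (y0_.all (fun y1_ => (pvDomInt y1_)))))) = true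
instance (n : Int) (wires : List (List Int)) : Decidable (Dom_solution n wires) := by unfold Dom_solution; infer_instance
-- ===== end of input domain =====

-- B replaces A's full rescan of the wire list at every stack pop by an adjacency index built once,
-- O(m^3) -> O(m^2); the equivalence proved is about the return value (A also mutates nothing observable).

-- ===== PORT A =====
-- wires[j][0] / wires[j][1]: all indices are in range on Pre_ inputs (j < len(wires) from range,
-- rows have length ≥ 2 by Pre_), so List.getD is exact here.
def pvW0 (wires : List (List Int)) (j : Nat) : Int := (wires.getD j []).getD 0 0
def pvW1 (wires : List (List Int)) (j : Nat) : Int := (wires.getD j []).getD 1 0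

-- state = (used, conn, cnt); conn holds the Python stack top-first (append = cons, pop = head)
-- one iteration j of A's inner 'for j in range(len(wires))'
def pvScanStepA (wires : List (List Int)) (st : Int)
    (s : List Int × List Int × Int) (j : Nat) : List Int × List Int × Int :=
  if s.1.getD j 0 = 1 then s
  else if pvW0 wires j = st then (s.1.set j 1, pvW1 wires j :: s.2.1, s.2.2 + 1)
  else if pvW1 wires j = st then (s.1.set j 1, pvW0 wires j :: s.2.1, s.2.2 + 1)
  else s

-- A's 'while conn:' loop; fuel bounds the number of pops: pops ≤ pushes = 1 + (edges newly
-- marked) ≤ len(wires), so fuel = len(wires) + 1 is never exhausted (exit on empty stack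
-- happens regardless of fuel) — the fuel only makes the same computation total.
def pvLoopA (wires : List (List Int)) (fuel : Nat) (s : List Int × List Int × Int) : Int :=
  match fuel, s with
  | _, (_, [], cnt) => cnt
  | 0, (_, _, cnt) => cnt
  | fuel + 1, (used, st :: conn, cnt) =>
      pvLoopA wires fuel ((List.range wires.length).foldl (pvScanStepA wires st) (used, conn, cnt))

def solution (n : Int) (wires : List (List Int)) : Int :=
  (List.range wires.length).foldl (fun answer i =>
    let used := (List.replicate wires.length (0 : Int)).set i 1
    let cnt := pvLoopA wires (wires.length + 1) (used, [pvW0 wires i], 0)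
    min answer |n - 2 - cnt - cnt|) (n + 1)

-- ===== PORT B =====
-- adj.setdefault(k, []).append(e)
def pvAdjIns (adj : PySem.Dict Int (List (Nat × Int))) (k : Int) (e : Nat × Int) :
    PySem.Dict Int (List (Nat × Int)) :=
  adj.insert k (adj.getD k [] ++ [e])

-- B's index-building loop over enumerate(wires)
def pvBuild (wires : List (List Int)) : PySem.Dict Int (List (Nat × Int)) :=
  (List.range wires.length).foldl (fun adj j =>
    if pvW1 wires j ≠ pvW0 wires j then
      pvAdjIns (pvAdjIns adj (pvW0 wires j) (j, pvW1 wires j)) (pvW1 wires j) (j, pvW0 wires j)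
    else pvAdjIns adj (pvW0 wires j) (j, pvW1 wires j))
    PySem.Dict.empty

-- one iteration of B's 'for j, other in adj.get(st, ())' ('not used[j]' on a 0/1 flag is '= 0')
def pvStepB (s : List Int × List Int × Int) (e : Nat × Int) : List Int × List Int × Int :=
  if s.1.getD e.1 0 = 0 then (s.1.set e.1 1, e.2 :: s.2.1, s.2.2 + 1) else s

-- B's 'while stack:' loop with its visited-vertex set ('if st in seen: continue'), same fuel
-- bound as A's (the number of pops is the same: pops ≤ 1 + edges newly marked ≤ len(wires))
def pvLoopB (adj : PySem.Dict Int (List (Nat × Int))) (fuel : Nat)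
    (s : List Int × List Int × Int) (seen : PySem.Set Int) : Int :=
  match fuel, s with
  | _, (_, [], cnt) => cnt
  | 0, (_, _, cnt) => cnt
  | fuel + 1, (used, st :: conn, cnt) =>
      if PySem.Set.contains seen st then pvLoopB adj fuel (used, conn, cnt) seen
      else pvLoopB adj fuel ((adj.getD st []).foldl pvStepB (used, conn, cnt))
             (PySem.Set.add seen st)

def solution_alt (n : Int) (wires : List (List Int)) : Int :=
  let adj := pvBuild wires
  (List.range wires.length).foldl (fun answer i =>
    let used := (List.replicate wires.length (0 : Int)).set i 1
    let cnt := pvLoopB adj (wires.length + 1) (used, [pvW0 wires i], 0) PySem.Set.empty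
    min answer |n - 2 - 2 * cnt|) (n + 1)

-- ===== PRECONDITION & SPEC =====
-- Pre_ excludes wires containing a row of fewer than 2 entries: on such inputs A in general raises
-- IndexError (it can happen to return when a length-1 row's single entry matches every comparison
-- first, e.g. (3, [[5]])), and B's adjacency build reads both endpoints of every row and raises.
def Pre_solution (n : Int) (wires : List (List Int)) : Prop := ∀ w ∈ wires, 2 ≤ w.length
instance (n : Int) (wires : List (List Int)) : Decidable (Pre_solution n wires) := by
  unfold Pre_solution; infer_instance

def pvWitness_solution : Int × List (List Int) := (4, [[1, 2], [2, 3], [3, 4]])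

def Spec_solution (n : Int) (wires : List (List Int)) (out : Int) : Prop := out = solution_alt n wires
instance (n : Int) (wires : List (List Int)) (out : Int) : Decidable (Spec_solution n wires out) := by
  unfold Spec_solution; infer_instance

-- ===== CLAIM (what is proved, stated in full; the proofs are below) =====
def Claim_equal_solution : Prop := ∀ (n : Int) (wires : List (List Int)),
  Dom_solution n wires → Pre_solution n wires → Spec_solution n wires (solution n wires)

-- ===== LEMMAS AND PROOFS =====

-- the adjacency entries edge j contributes under key st (mirrors A's if/elif on wires[j])
def pvHit (wires : List (List Int)) (st : Int) (j : Nat) : Option (Nat × Int) :=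
  if pvW0 wires j = st then some (j, pvW1 wires j)
  else if pvW1 wires j = st then some (j, pvW0 wires j)
  else none

lemma pvBuild_step_getD (wires : List (List Int)) (st : Int) (j : Nat)
    (d : PySem.Dict Int (List (Nat × Int))) :
    ((if pvW1 wires j ≠ pvW0 wires j then
        pvAdjIns (pvAdjIns d (pvW0 wires j) (j, pvW1 wires j)) (pvW1 wires j) (j, pvW0 wires j)
      else pvAdjIns d (pvW0 wires j) (j, pvW1 wires j)).getD st [])
    = d.getD st [] ++ (pvHit wires st j).toList := by
  unfold pvHit pvAdjIns
  by_cases h0 : pvW0 wires j = st <;> by_cases h1 : pvW1 wires j = st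
  · simp [h0, h1]
  · simp [h0, h1, Ne.symm h1, PySem.Dict.getD_insert]
  · simp [h0, h1, Ne.symm h0, PySem.Dict.getD_insert]
  · by_cases h2 : pvW1 wires j = pvW0 wires j <;>
      simp [h0, h1, h2, Ne.symm h0, Ne.symm h1, PySem.Dict.getD_insert]

lemma pvBuild_getD_aux (wires : List (List Int)) (st : Int) (l : List Nat)
    (adj : PySem.Dict Int (List (Nat × Int))) :
    ((l.foldl (fun adj j =>
        if pvW1 wires j ≠ pvW0 wires j then
          pvAdjIns (pvAdjIns adj (pvW0 wires j) (j, pvW1 wires j)) (pvW1 wires j) (j, pvW0 wires j)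
        else pvAdjIns adj (pvW0 wires j) (j, pvW1 wires j))
        adj).getD st []) = adj.getD st [] ++ l.filterMap (pvHit wires st) := by
  induction l generalizing adj with
  | nil => simp
  | cons j l ih =>
      simp only [List.foldl_cons, List.filterMap_cons, ih, pvBuild_step_getD]
      cases pvHit wires st j <;> simp

lemma pvBuild_getD (wires : List (List Int)) (st : Int) :
    (pvBuild wires).getD st [] = (List.range wires.length).filterMap (pvHit wires st) := by
  unfold pvBuild
  rw [pvBuild_getD_aux]
  simp

-- invariant: the used list holds only 0/1 flags
def pvInv (used : List Int) : Prop := ∀ x ∈ used, x = 0 ∨ x = 1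

lemma pvInv_getD (used : List Int) (j : Nat) (h : pvInv used) :
    used.getD j 0 = 0 ∨ used.getD j 0 = 1 := by
  rcases h' : used[j]? with _ | x
  · simp [List.getD_eq_getElem?_getD, h']
  · have := h x (List.mem_of_getElem? h')
    simpa [List.getD_eq_getElem?_getD, h'] using this

lemma pvInv_set (used : List Int) (j : Nat) (h : pvInv used) : pvInv (used.set j 1) := by
  intro x hx
  rcases List.mem_or_eq_of_mem_set hx with h' | h'
  · exact h x h'
  · right; exact h'

lemma pvStepA_none (wires : List (List Int)) (st : Int) (j : Nat)
    (s : List Int × List Int × Int) (h : pvHit wires st j = none) :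
    pvScanStepA wires st s j = s := by
  unfold pvHit at h
  unfold pvScanStepA
  split_ifs at h ⊢ <;> simp_all

lemma pvStepA_some (wires : List (List Int)) (st : Int) (j : Nat)
    (s : List Int × List Int × Int) (e : Nat × Int)
    (h : pvHit wires st j = some e) (hs : pvInv s.1) :
    pvScanStepA wires st s j = pvStepB s e := by
  unfold pvHit at h
  unfold pvScanStepA pvStepB
  rcases pvInv_getD s.1 j hs with hu | hu <;> split_ifs at h <;>
    (injection h with h; subst h) <;> simp_all

lemma pvStepB_inv (s : List Int × List Int × Int) (e : Nat × Int) (hs : pvInv s.1) :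
    pvInv (pvStepB s e).1 := by
  unfold pvStepB
  split_ifs
  · exact pvInv_set _ _ hs
  · exact hs

lemma pvStepA_used (wires : List (List Int)) (st : Int) (j : Nat)
    (s : List Int × List Int × Int) (h : s.1.getD j 0 = 1) :
    pvScanStepA wires st s j = s := by
  unfold pvScanStepA
  rw [if_pos h]

-- a vertex is "clean" once every wire incident to it is marked; then A's rescan is a no-op
def pvClean (wires : List (List Int)) (seen : PySem.Set Int) (used : List Int) : Prop :=
  ∀ v ∈ seen, ∀ j ∈ List.range wires.length, ∀ e, pvHit wires v j = some e → used.getD j 0 = 1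

lemma pvScanA_id (wires : List (List Int)) (st : Int) (l : List Nat) :
    ∀ s : List Int × List Int × Int,
      (∀ j ∈ l, ∀ e, pvHit wires st j = some e → s.1.getD j 0 = 1) →
      l.foldl (pvScanStepA wires st) s = s := by
  induction l with
  | nil => intro s _; rfl
  | cons j l ih =>
      intro s h
      have hstep : pvScanStepA wires st s j = s := by
        rcases hh : pvHit wires st j with _ | e
        · exact pvStepA_none wires st j s hh
        · exact pvStepA_used wires st j s (h j (List.mem_cons_self ..) e hh)
      rw [List.foldl_cons, hstep]
      exact ih s fun j' hj' e he => h j' (List.mem_cons_of_mem _ hj') e he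

lemma pvStepB_len (s : List Int × List Int × Int) (e : Nat × Int) :
    (pvStepB s e).1.length = s.1.length := by
  unfold pvStepB
  split_ifs <;> simp

lemma pvStepB_mark_mono (s : List Int × List Int × Int) (e : Nat × Int) (j : Nat)
    (h : s.1.getD j 0 = 1) : (pvStepB s e).1.getD j 0 = 1 := by
  unfold pvStepB
  split_ifs with h0
  · by_cases hej : e.1 = j
    · subst hej
      simp_all
    · simpa [List.getD_eq_getElem?_getD, List.getElem?_set, hej] using h
  · exact h

lemma pvFoldB_len (l : List (Nat × Int)) :
    ∀ s : List Int × List Int × Int, ((l.foldl pvStepB s)).1.length = s.1.length := by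
  induction l with
  | nil => intro s; rfl
  | cons e l ih => intro s; rw [List.foldl_cons, ih, pvStepB_len]

lemma pvFoldB_mark_mono (l : List (Nat × Int)) :
    ∀ (s : List Int × List Int × Int) (j : Nat), s.1.getD j 0 = 1 →
      ((l.foldl pvStepB s)).1.getD j 0 = 1 := by
  induction l with
  | nil => exact fun s j h => h
  | cons e l ih => exact fun s j h => ih (pvStepB s e) j (pvStepB_mark_mono s e j h)

lemma pvFoldB_marks (l : List (Nat × Int)) :
    ∀ s : List Int × List Int × Int, pvInv s.1 → (∀ e ∈ l, e.1 < s.1.length) →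
      ∀ e ∈ l, ((l.foldl pvStepB s)).1.getD e.1 0 = 1 := by
  induction l with
  | nil => intro s _ _ e he; cases he
  | cons e0 l ih =>
      intro s hs hlt e heIn
      rcases List.mem_cons.mp heIn with he | he
      · -- the head: it is marked by the first step and stays marked
        subst he
        rw [List.foldl_cons]
        apply pvFoldB_mark_mono
        unfold pvStepB
        rcases pvInv_getD s.1 e.1 hs with h0 | h0
        · rw [if_pos h0]
          have hl : e.1 < s.1.length := hlt e (List.mem_cons_self ..)
          simp [List.getD_eq_getElem?_getD, hl]
        · rw [if_neg (by rw [h0]; exact one_ne_zero)]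
          exact h0
      · rw [List.foldl_cons]
        exact ih (pvStepB s e0) (pvStepB_inv s e0 hs)
          (fun e' he' => (pvStepB_len s e0) ▸ hlt e' (List.mem_cons_of_mem _ he')) e he

lemma pvHit_fst (wires : List (List Int)) (st : Int) (j : Nat) (e : Nat × Int)
    (h : pvHit wires st j = some e) : e.1 = j := by
  unfold pvHit at h
  split_ifs at h <;> (injection h with h; subst h; rfl)

lemma pvScan_eq_foldB (wires : List (List Int)) (st : Int) (l : List Nat) :
    ∀ s : List Int × List Int × Int, pvInv s.1 →
      l.foldl (pvScanStepA wires st) s = (l.filterMap (pvHit wires st)).foldl pvStepB s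
      ∧ pvInv ((l.filterMap (pvHit wires st)).foldl pvStepB s).1 := by
  induction l with
  | nil => exact fun s hs => ⟨rfl, hs⟩
  | cons j l ih =>
      intro s hs
      rcases hh : pvHit wires st j with _ | e
      · simp only [List.foldl_cons, List.filterMap_cons, hh, pvStepA_none wires st j s hh]
        exact ih s hs
      · simp only [List.foldl_cons, List.filterMap_cons, hh,
          pvStepA_some wires st j s e hh hs]
        exact ih (pvStepB s e) (pvStepB_inv s e hs)

lemma pvLoop_eq (wires : List (List Int)) (fuel : Nat) :
    ∀ (s : List Int × List Int × Int) (seen : PySem.Set Int),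
      pvInv s.1 → s.1.length = wires.length → pvClean wires seen s.1 →
      pvLoopA wires fuel s = pvLoopB (pvBuild wires) fuel s seen := by
  induction fuel with
  | zero =>
      intro s _ _ _ _
      obtain ⟨used, conn, cnt⟩ := s
      cases conn <;> rfl
  | succ fuel ih =>
      intro s seen hinv hlen hclean
      obtain ⟨used, conn, cnt⟩ := s
      cases conn with
      | nil => rfl
      | cons st conn =>
          by_cases hseen : st ∈ seen
          · have hB : pvLoopB (pvBuild wires) (fuel + 1) (used, st :: conn, cnt) seen
                = pvLoopB (pvBuild wires) fuel (used, conn, cnt) seen := by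
              show (if PySem.Set.contains seen st then _ else _) = _
              rw [if_pos ((PySem.Set.contains_iff seen st).mpr hseen)]
            have hA : pvLoopA wires (fuel + 1) (used, st :: conn, cnt)
                = pvLoopA wires fuel (used, conn, cnt) := by
              show pvLoopA wires fuel
                  ((List.range wires.length).foldl (pvScanStepA wires st) (used, conn, cnt)) = _
              rw [pvScanA_id wires st (List.range wires.length) (used, conn, cnt)
                (fun j hj e he => hclean st hseen j hj e he)]
            rw [hA, hB]
            exact ih (used, conn, cnt) seen hinv hlen hclean
          · have hB : pvLoopB (pvBuild wires) (fuel + 1) (used, st :: conn, cnt) seen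
                = pvLoopB (pvBuild wires) fuel
                    (((pvBuild wires).getD st []).foldl pvStepB (used, conn, cnt))
                    (PySem.Set.add seen st) := by
              show (if PySem.Set.contains seen st then _ else _) = _
              rw [if_neg (fun hc => hseen ((PySem.Set.contains_iff seen st).mp hc))]
            obtain ⟨heq, hinv'⟩ :=
              pvScan_eq_foldB wires st (List.range wires.length) (used, conn, cnt) hinv
            have hA : pvLoopA wires (fuel + 1) (used, st :: conn, cnt)
                = pvLoopA wires fuel
                    (((pvBuild wires).getD st []).foldl pvStepB (used, conn, cnt)) := by
              show pvLoopA wires fuel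
                  ((List.range wires.length).foldl (pvScanStepA wires st) (used, conn, cnt)) = _
              rw [heq, ← pvBuild_getD wires st]
            rw [hA, hB]
            rw [← pvBuild_getD wires st] at hinv'
            have hbound : ∀ e ∈ (pvBuild wires).getD st [],
                e.1 < (used, conn, cnt).1.length := by
              intro e he
              rw [pvBuild_getD wires st] at he
              obtain ⟨j, hj, hje⟩ := List.mem_filterMap.mp he
              rw [pvHit_fst wires st j e hje, hlen]
              exact List.mem_range.mp hj
            apply ih _ (PySem.Set.add seen st) hinv'
            · rw [pvFoldB_len]; exact hlen
            · intro v hv j hj e he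
              rcases (PySem.Set.mem_add seen st v).mp hv with hv | rfl
              · exact pvFoldB_mark_mono _ _ _ (hclean v hv j hj e he)
              · have hmem : e ∈ (pvBuild wires).getD v [] := by
                  rw [pvBuild_getD wires v]
                  exact List.mem_filterMap.mpr ⟨j, hj, he⟩
                have := pvFoldB_marks ((pvBuild wires).getD v [])
                  (used, conn, cnt) hinv hbound e hmem
                rwa [pvHit_fst wires v j e he] at this

lemma pvInv_init (m i : Nat) : pvInv ((List.replicate m (0 : Int)).set i 1) := by
  apply pvInv_set
  intro x hx
  left; exact List.eq_of_mem_replicate hx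

-- ===== VERDICT (by name: the statement is the Claim_ definition above) =====
theorem solution_spec : Claim_equal_solution := by
  intro n wires _ _
  unfold Spec_solution solution solution_alt
  dsimp only
  apply PySem.List.foldl_congr_mem
  intro answer i _
  rw [pvLoop_eq wires (wires.length + 1) _ PySem.Set.empty (pvInv_init wires.length i)
    (by simp) (fun v hv => by simp [PySem.Set.empty] at hv)]
  congr 1
  congr 1
  ring
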